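-- pv_equiv track=rewrite | github.com/ajaykumarreddy-k/Prompt-Machine-Ajayakr-prompter- | design_style_detector.py | get_style_retrieval_filter
-- ===== SOURCE A (Python) =====
-- def get_style_retrieval_filter(styles: list[str]) -> list[str]:
--     """Returns list of category strings from WHOLE_FILE_ROUTES to prioritize."""
--     categories = set()
--
--     for style in styles:
--         if style in ["glassmorphism", "neobrutalism", "neumorphism", "aurora", "cyberpunk", "neon_glow"]:
--             categories.update(["components", "effects"])
--         elif style in ["retro_80s", "y2k", "Memphis", "pixelart"]:
--             categories.update(["components", "animations"])
--         elif style in ["bento", "material", "corporate", "Swiss"]: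
--             categories.update(["components", "layouts"])
--         elif style in ["minimalist", "Japandi", "organic", "cottagecore", "monochrome"]:
--             categories.update(["components"])
--         elif style in ["dopamine", "gradient_mesh", "futuristic"]:
--             categories.update(["components", "effects", "animations"])
--         else:
--             categories.add("components")
--
--     return list(categories)
-- ===== SOURCE B (Python) =====
-- _EFFECT_STYLES = frozenset([
--     "glassmorphism", "neobrutalism", "neumorphism", "aurora", "cyberpunk", "neon_glow",
--     "dopamine", "gradient_mesh", "futuristic",
-- ])
-- _ANIMATION_STYLES = frozenset([
--     "retro_80s", "y2k", "Memphis", "pixelart",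
--     "dopamine", "gradient_mesh", "futuristic",
-- ])
-- _LAYOUT_STYLES = frozenset(["bento", "material", "corporate", "Swiss"])
--
--
-- def get_style_retrieval_filter(styles: list[str]) -> list[str]:
--     """Returns list of category strings from WHOLE_FILE_ROUTES to prioritize."""
--     tags = []
--     for style in styles:
--         tags.append("components")
--         if style in _EFFECT_STYLES:
--             tags.append("effects")
--         if style in _ANIMATION_STYLES:
--             tags.append("animations")
--         if style in _LAYOUT_STYLES:
--             tags.append("layouts")
--     return list(dict.fromkeys(tags))
-- ===== Notes on version B (the rewrite author's own statement) =====
-- stated objective: alternative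
-- what changed: Instead of maintaining a set and dispatching each style through a six-branch if-elif cascade of list-membership scans that unions a category group into it, B emits a flat tag stream in one pass using three independent frozenset membership tests (no elif, no set maintained during the loop) and deduplicates the stream once at the end keeping first occurrences.
import Mathlib
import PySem

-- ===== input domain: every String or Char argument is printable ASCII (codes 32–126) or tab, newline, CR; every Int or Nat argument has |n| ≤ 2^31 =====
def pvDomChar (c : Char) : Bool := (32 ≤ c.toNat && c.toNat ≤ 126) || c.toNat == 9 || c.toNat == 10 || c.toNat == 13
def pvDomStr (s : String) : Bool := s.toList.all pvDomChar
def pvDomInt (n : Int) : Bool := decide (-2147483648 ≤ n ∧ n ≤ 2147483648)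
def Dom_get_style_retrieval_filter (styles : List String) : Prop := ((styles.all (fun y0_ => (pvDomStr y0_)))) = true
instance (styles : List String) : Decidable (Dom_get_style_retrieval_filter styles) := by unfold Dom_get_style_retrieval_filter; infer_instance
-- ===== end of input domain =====

-- B replaces A's incremental set-union with a six-branch if-elif cascade by a generate-then-dedup
-- pipeline: one pass emitting a flat tag stream via three independent membership tests, then a
-- single first-occurrence dedup (alternative decomposition; Python A's output order is set-hash
-- order and is not modelled — the equivalence is about the set of categories in a canonical order).

-- ===== PORT A =====
def get_style_retrieval_filter (styles : List String) : List String :=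
  styles.foldl (fun categories style =>
    if ["glassmorphism", "neobrutalism", "neumorphism", "aurora", "cyberpunk", "neon_glow"].contains style then
      PySem.Set.update categories ["components", "effects"]
    else if ["retro_80s", "y2k", "Memphis", "pixelart"].contains style then
      PySem.Set.update categories ["components", "animations"]
    else if ["bento", "material", "corporate", "Swiss"].contains style then
      PySem.Set.update categories ["components", "layouts"]
    else if ["minimalist", "Japandi", "organic", "cottagecore", "monochrome"].contains style then
      PySem.Set.update categories ["components"]
    else if ["dopamine", "gradient_mesh", "futuristic"].contains style then
      PySem.Set.update categories ["components", "effects", "animations"]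
    else
      PySem.Set.add categories "components") PySem.Set.empty

-- ===== PORT B =====
-- Source B's module-level frozensets (literal, all elements distinct)
def effectStyles : PySem.Set String :=
  PySem.Set.ofList ["glassmorphism", "neobrutalism", "neumorphism", "aurora", "cyberpunk", "neon_glow",
                    "dopamine", "gradient_mesh", "futuristic"]
def animationStyles : PySem.Set String :=
  PySem.Set.ofList ["retro_80s", "y2k", "Memphis", "pixelart",
                    "dopamine", "gradient_mesh", "futuristic"]
def layoutStyles : PySem.Set String :=
  PySem.Set.ofList ["bento", "material", "corporate", "Swiss"]

def get_style_retrieval_filter_alt (styles : List String) : List String :=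
  -- one pass building the tag stream (each conditional append kept in Source B's order)
  let tags := styles.foldl (fun tags style =>
    (((tags ++ ["components"])
      ++ (if PySem.Set.contains effectStyles style then ["effects"] else []))
      ++ (if PySem.Set.contains animationStyles style then ["animations"] else []))
      ++ (if PySem.Set.contains layoutStyles style then ["layouts"] else [])) []
  -- list(dict.fromkeys(tags)) — first occurrences in order; PySem.List.dedup is exactly this
  PySem.List.dedup tags

-- ===== PRECONDITION & SPEC =====
def Spec_get_style_retrieval_filter (styles : List String) (out : List String) : Prop := out = get_style_retrieval_filter_alt styles
instance (styles : List String) (out : List String) : Decidable (Spec_get_style_retrieval_filter styles out) := by unfold Spec_get_style_retrieval_filter; infer_instance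

-- ===== CLAIM (what is proved, stated in full; the proofs are below) =====
def Claim_equal_get_style_retrieval_filter : Prop := ∀ (styles : List String), Dom_get_style_retrieval_filter styles → Spec_get_style_retrieval_filter styles (get_style_retrieval_filter styles)

-- ===== LEMMAS AND PROOFS =====

-- the category list A's branch for a given style inserts (same conditions, same order)
def catA (style : String) : List String :=
  if ["glassmorphism", "neobrutalism", "neumorphism", "aurora", "cyberpunk", "neon_glow"].contains style then
    ["components", "effects"]
  else if ["retro_80s", "y2k", "Memphis", "pixelart"].contains style then
    ["components", "animations"]
  else if ["bento", "material", "corporate", "Swiss"].contains style then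
    ["components", "layouts"]
  else if ["minimalist", "Japandi", "organic", "cottagecore", "monochrome"].contains style then
    ["components"]
  else if ["dopamine", "gradient_mesh", "futuristic"].contains style then
    ["components", "effects", "animations"]
  else
    ["components"]

-- the tag chunk B's loop body emits for a given style
def catB (style : String) : List String :=
  (( (["components"] : List String)
    ++ (if PySem.Set.contains effectStyles style then ["effects"] else []))
    ++ (if PySem.Set.contains animationStyles style then ["animations"] else []))
    ++ (if PySem.Set.contains layoutStyles style then ["layouts"] else [])

-- per-style the two chunks coincide
lemma cat_eq (style : String) : catA style = catB style := by
  by_cases h1 : ["glassmorphism", "neobrutalism", "neumorphism", "aurora", "cyberpunk", "neon_glow"].contains style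
  · simp only [List.contains_eq_mem, List.mem_cons, List.not_mem_nil, or_false, decide_eq_true_eq] at h1
    rcases h1 with h | h | h | h | h | h <;> subst h <;> rfl
  by_cases h2 : ["retro_80s", "y2k", "Memphis", "pixelart"].contains style
  · simp only [List.contains_eq_mem, List.mem_cons, List.not_mem_nil, or_false, decide_eq_true_eq] at h2
    rcases h2 with h | h | h | h <;> subst h <;> rfl
  by_cases h3 : ["bento", "material", "corporate", "Swiss"].contains style
  · simp only [List.contains_eq_mem, List.mem_cons, List.not_mem_nil, or_false, decide_eq_true_eq] at h3
    rcases h3 with h | h | h | h <;> subst h <;> rfl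
  by_cases h4 : ["minimalist", "Japandi", "organic", "cottagecore", "monochrome"].contains style
  · simp only [List.contains_eq_mem, List.mem_cons, List.not_mem_nil, or_false, decide_eq_true_eq] at h4
    rcases h4 with h | h | h | h | h <;> subst h <;> rfl
  by_cases h5 : ["dopamine", "gradient_mesh", "futuristic"].contains style
  · simp only [List.contains_eq_mem, List.mem_cons, List.not_mem_nil, or_false, decide_eq_true_eq] at h5
    rcases h5 with h | h | h <;> subst h <;> rfl
  -- style matches no branch: every membership test is false
  simp only [List.contains_eq_mem, List.mem_cons, List.not_mem_nil, or_false,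
    decide_eq_true_eq] at h1 h2 h3 h4 h5
  have e1 : style ∉ effectStyles := by
    simp only [effectStyles, PySem.Set.mem_ofList, List.mem_cons, List.not_mem_nil, or_false]
    tauto
  have e2 : style ∉ animationStyles := by
    simp only [animationStyles, PySem.Set.mem_ofList, List.mem_cons, List.not_mem_nil, or_false]
    tauto
  have e3 : style ∉ layoutStyles := by
    simp only [layoutStyles, PySem.Set.mem_ofList, List.mem_cons, List.not_mem_nil, or_false]
    tauto
  simp [catA, catB, PySem.Set.contains, h1, h2, h3, h4, h5, e1, e2, e3]

-- A's loop step is 'update with catA'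
lemma stepA_eq (s : PySem.Set String) (style : String) :
    (if ["glassmorphism", "neobrutalism", "neumorphism", "aurora", "cyberpunk", "neon_glow"].contains style then
      PySem.Set.update s ["components", "effects"]
    else if ["retro_80s", "y2k", "Memphis", "pixelart"].contains style then
      PySem.Set.update s ["components", "animations"]
    else if ["bento", "material", "corporate", "Swiss"].contains style then
      PySem.Set.update s ["components", "layouts"]
    else if ["minimalist", "Japandi", "organic", "cottagecore", "monochrome"].contains style then
      PySem.Set.update s ["components"]
    else if ["dopamine", "gradient_mesh", "futuristic"].contains style then
      PySem.Set.update s ["components", "effects", "animations"]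
    else
      PySem.Set.add s "components") = PySem.Set.update s (catA style) := by
  unfold catA
  split_ifs <;> rfl

-- folding 'update with catA' over styles = folding 'add' over the concatenated chunks
lemma foldA_flat (styles : List String) (s : PySem.Set String) :
    styles.foldl (fun s style => PySem.Set.update s (catA style)) s
      = (styles.flatMap catA).foldl PySem.Set.add s := by
  induction styles generalizing s with
  | nil => rfl
  | cons x xs ih =>
    simp only [List.foldl_cons, List.flatMap_cons, List.foldl_append]
    exact ih _

-- B's tag stream is the concatenation of the catB chunks
lemma foldB_flat (styles : List String) (acc : List String) :
    styles.foldl (fun tags style =>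
      (((tags ++ ["components"])
        ++ (if PySem.Set.contains effectStyles style then ["effects"] else []))
        ++ (if PySem.Set.contains animationStyles style then ["animations"] else []))
        ++ (if PySem.Set.contains layoutStyles style then ["layouts"] else [])) acc
      = acc ++ styles.flatMap catB := by
  induction styles generalizing acc with
  | nil => simp
  | cons x xs ih =>
    rw [List.foldl_cons, ih]
    simp [catB]

lemma flat_eq (styles : List String) : styles.flatMap catA = styles.flatMap catB := by
  induction styles with
  | nil => rfl
  | cons x xs ih => rw [List.flatMap_cons, List.flatMap_cons, cat_eq, ih]

theorem get_style_retrieval_filter_spec : Claim_equal_get_style_retrieval_filter := by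
  intro styles _
  unfold Spec_get_style_retrieval_filter get_style_retrieval_filter get_style_retrieval_filter_alt
  simp only [stepA_eq, foldA_flat, foldB_flat, List.nil_append, flat_eq,
    PySem.List.dedup_eq_ofList, PySem.Set.ofList_eq_foldl, PySem.Set.empty]
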